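-- pv_equiv track=rewrite | github.com/MrJujek/agh | asd/old_exams/23-24/egz3/B/egz3b.py | kunlucky
-- ===== SOURCE A (Python) =====
-- def kunlucky(T, k):
--     n = len(T)
--     if n == 0:
--         return 0
--
--     max_in_T = T[0]
--
--     for num in T:
--         max_in_T = max(max_in_T, num)
--     is_unlucky = [False]*(max_in_T+1)
--
--     xi = k
--     i = 1
--     while xi<=max_in_T:
--         is_unlucky[xi] = True
--         xi = xi + (xi%i) + 7
--         i+=1
--
--     left = 0
--     count_unlucky = 0
--     max_len = 0
--
--     for right in range(n):
--         if is_unlucky[T[right]]: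
--             count_unlucky+=1
--
--         while count_unlucky > 2:
--             if is_unlucky[T[left]]:
--                 count_unlucky -= 1
--             left+=1
--
--         max_len = max(max_len, right - left + 1)
--
--     return max_len
-- ===== SOURCE B (Python) =====
-- def kunlucky(T, k):
--     n = len(T)
--     if n == 0:
--         return 0
--
--     max_in_T = T[0]
--     for num in T:
--         max_in_T = max(max_in_T, num)
--     is_unlucky = [False]*(max_in_T+1)
--
--     xi = k
--     i = 1
--     while xi <= max_in_T:
--         is_unlucky[xi] = True
--         xi = xi + (xi % i) + 7
--         i += 1
--
--     # positions of the unlucky values, then a closed-form scan over gaps: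
--     # the longest window with at most 2 unlucky elements is delimited by the
--     # unlucky positions three apart (with sentinels -1 and n around them).
--     pos = [j for j, x in enumerate(T) if is_unlucky[x]]
--     if len(pos) <= 2:
--         return n
--     aug = [-1] + pos + [n]
--     best = 0
--     for hi, lo in zip(aug[3:], aug):
--         best = max(best, hi - lo - 1)
--     return best
-- ===== Notes on version B (the rewrite author's own statement) =====
-- stated objective: alternative
-- what changed: B keeps A's max scan and unlucky sieve but replaces the two-pointer sliding window (inner while-loop moving a left pointer with a running count) by collecting the list of unlucky positions and taking the maximum gap between unlucky positions three apart in the sentinel-augmented position list.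
import Mathlib
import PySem

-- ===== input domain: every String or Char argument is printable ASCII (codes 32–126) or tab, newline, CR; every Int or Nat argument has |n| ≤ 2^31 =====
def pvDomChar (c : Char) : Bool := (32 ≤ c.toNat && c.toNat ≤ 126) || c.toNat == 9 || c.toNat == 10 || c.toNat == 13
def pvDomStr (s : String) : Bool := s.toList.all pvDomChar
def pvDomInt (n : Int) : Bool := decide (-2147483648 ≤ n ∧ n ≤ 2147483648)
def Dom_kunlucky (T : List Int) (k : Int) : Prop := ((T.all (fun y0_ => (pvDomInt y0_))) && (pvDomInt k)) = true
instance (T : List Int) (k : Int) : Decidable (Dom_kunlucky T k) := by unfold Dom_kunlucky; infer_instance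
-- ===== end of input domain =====

-- B replaces A's sliding-window sweep by a closed-form scan over the gaps between
-- unlucky positions (same max scan and sieve, which B keeps verbatim); objective: alternative.

-- ===== PORT A =====
-- shared straight-line prefix of both Pythons: max scan and the unlucky sieve
def pvMaxIn (T : List Int) : Int := T.foldl (fun acc num => max acc num) (T.headD 0)

def pvSieveLoop (maxT : Int) (arr : List Bool) (xi i : Int) (hi : 1 ≤ i) : List Bool :=
  if h : xi ≤ maxT then
    pvSieveLoop maxT (PySem.List.pySetD arr xi true) (xi + PySem.Int.mod xi i + 7) (i + 1) (by omega)
  else arr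
termination_by (maxT + 1 - xi).toNat
decreasing_by
  have hm : 0 ≤ PySem.Int.mod xi i :=
    PySem.Int.mod_nonneg xi (lt_of_lt_of_le zero_lt_one hi)
  have h2 : xi < xi + (PySem.Int.mod xi i + 7) :=
    lt_add_of_pos_right xi (add_pos_of_nonneg_of_pos hm (by decide))
  rw [← add_assoc] at h2
  exact (Int.toNat_lt_toNat (Int.sub_pos.mpr (Int.lt_add_one_iff.mpr h))).mpr
    (sub_lt_sub_left h2 (maxT + 1))

def pvSieve (T : List Int) (k : Int) : List Bool :=
  pvSieveLoop (pvMaxIn T) (List.replicate ((pvMaxIn T) + 1).toNat false) k 1 (le_refl 1)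

-- A's inner 'while count_unlucky > 2' loop (the 'left < len' conjunct only totalizes
-- the recursion: Python would raise an IndexError past the end, which never happens)
def pvShrink (T : List Int) (u : List Bool) (left count : Int) : Int × Int :=
  if h : 2 < count ∧ left < (T.length : Int) then
    pvShrink T u (left + 1)
      (if PySem.List.pyGetD u (PySem.List.pyGetD T left 0) false then count - 1 else count)
  else (left, count)
termination_by ((T.length : Int) - left).toNat
decreasing_by
  exact (Int.toNat_lt_toNat (Int.sub_pos.mpr h.2)).mpr
    (sub_lt_sub_left (lt_add_one left) ((T.length : Int)))

def pvStepA (T : List Int) (u : List Bool) (s : Int × Int × Int) (p : Int × Int) : Int × Int × Int :=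
  let c := if PySem.List.pyGetD u p.2 false then s.2.1 + 1 else s.2.1
  let lc := pvShrink T u s.1 c
  (lc.1, lc.2, max s.2.2 (p.1 - lc.1 + 1))

def kunlucky (T : List Int) (k : Int) : Int :=
  if T.length = 0 then 0
  else
    let u := pvSieve T k
    ((PySem.List.enumerate T 0).foldl (pvStepA T u) (0, 0, 0)).2.2

-- ===== PORT B =====
def kunlucky_alt (T : List Int) (k : Int) : Int :=
  if T.length = 0 then 0
  else
    let u := pvSieve T k
    let pos := ((PySem.List.enumerate T 0).filter
        (fun p => PySem.List.pyGetD u p.2 false)).map (fun p => p.1)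
    if pos.length ≤ 2 then (T.length : Int)
    else
      let aug := -1 :: pos ++ [(T.length : Int)]
      ((aug.drop 3).zip aug).foldl (fun best q => max best (q.1 - q.2 - 1)) 0

-- ===== PRECONDITION & SPEC =====
-- Pre_ excludes exactly the inputs where Python A raises an IndexError: a nonempty T
-- whose maximum is negative (empty sieve list), a start k below -(max+1) that is still
-- ≤ max (first sieve write out of range), or an element below -(max+1) (read out of
-- range).  On every input where A returns — including negative-index wraparound reads
-- and writes, which the ports model with pyGetD/pySetD — the claim applies.
def Pre_kunlucky (T : List Int) (k : Int) : Prop :=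
  T = [] ∨
    (0 ≤ T.foldl (fun acc num => max acc num) (T.headD 0) ∧
     (-(T.foldl (fun acc num => max acc num) (T.headD 0) + 1) ≤ k ∨
       T.foldl (fun acc num => max acc num) (T.headD 0) < k) ∧
     ∀ x ∈ T, -(T.foldl (fun acc num => max acc num) (T.headD 0) + 1) ≤ x)
instance (T : List Int) (k : Int) : Decidable (Pre_kunlucky T k) := by
  unfold Pre_kunlucky; infer_instance

def pvWitness_kunlucky : List Int × Int := ([3, 1, 2], 0)

def Spec_kunlucky (T : List Int) (k : Int) (out : Int) : Prop := out = kunlucky_alt T k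
instance (T : List Int) (k : Int) (out : Int) : Decidable (Spec_kunlucky T k out) := by
  unfold Spec_kunlucky; infer_instance

-- ===== CLAIM (what is proved, stated in full; the proofs are below) =====
def Claim_equal_kunlucky : Prop :=
  ∀ (T : List Int) (k : Int), Dom_kunlucky T k → Pre_kunlucky T k →
    Spec_kunlucky T k (kunlucky T k)

-- ===== LEMMAS AND PROOFS =====

-- the badness predicate on indices, and the positions of bad indices below m
def pvB (T : List Int) (u : List Bool) (j : Nat) : Bool :=
  PySem.List.pyGetD u (T.getD j 0) false

def pvBadPos (T : List Int) (u : List Bool) (m : Nat) : List Nat :=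
  (List.range m).filter (pvB T u)

-- A's left pointer after the window's right edge has seen exactly the bad positions p
def pvLft (p : List Nat) : Int :=
  if 3 ≤ p.length then (p.getD (p.length - 3) 0 : Nat) + 1 else 0

-- B's gap maximum: longest window with ≤ 2 bad positions strictly between lo and e
def pvW (lo : Int) (p : List Int) (e : Int) : Int :=
  if h : p.length ≤ 2 then e - lo - 1
  else max (p.getD 2 0 - lo - 1) (pvW (p.getD 0 0) p.tail e)
termination_by p.length
decreasing_by
  rw [List.length_tail]
  exact Nat.sub_lt
    (Nat.pos_of_ne_zero (fun hz => h (by rw [hz]; exact Nat.zero_le 2))) Nat.one_pos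

def pvLast3 (lo : Int) (p : List Int) : Int :=
  if p.length ≤ 2 then lo else p.getD (p.length - 3) 0

theorem pvShrink_noop (T : List Int) (u : List Bool) (l c : Int) (hc : c ≤ 2) :
    pvShrink T u l c = (l, c) := by
  rw [pvShrink]; simp; omega

theorem pvW_le2 (lo : Int) (p : List Int) (e : Int) (h : p.length ≤ 2) :
    pvW lo p e = e - lo - 1 := by rw [pvW]; simp [h]

theorem pvW_gt2 (lo : Int) (p : List Int) (e : Int) (h : ¬ p.length ≤ 2) :
    pvW lo p e = max (p.getD 2 0 - lo - 1) (pvW (p.getD 0 0) p.tail e) := by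
  rw [pvW]; simp [h]

theorem pvLast3_cons (lo a : Int) (t : List Int) (h : ¬ (a :: t).length ≤ 2) :
    pvLast3 a t = pvLast3 lo (a :: t) := by
  simp only [List.length_cons] at h
  by_cases ht : t.length ≤ 2
  · have ht3 : t.length = 2 := by omega
    simp [pvLast3, ht3]
  · have h1 : ¬ (t.length + 1 ≤ 2) := by omega
    simp only [pvLast3, List.length_cons, if_neg ht, if_neg h1]
    have : t.length + 1 - 3 = (t.length - 3) + 1 := by omega
    rw [this, List.getD_cons_succ]

theorem pvW_step1 : ∀ (p : List Int) (lo e : Int),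
    pvW lo p (e + 1) = max (pvW lo p e) (e - pvLast3 lo p) := by
  intro p
  induction p with
  | nil => intro lo e; rw [pvW_le2 _ _ _ (by simp), pvW_le2 _ _ _ (by simp)]
           simp [pvLast3]; omega
  | cons a t IH =>
    intro lo e
    by_cases h : (a :: t).length ≤ 2
    · rw [pvW_le2 _ _ _ h, pvW_le2 _ _ _ h]
      unfold pvLast3; rw [if_pos h]; omega
    · rw [pvW_gt2 _ _ _ h, pvW_gt2 _ _ _ h]
      simp only [List.tail_cons, List.getD_cons_zero]
      rw [IH a e, ← pvLast3_cons lo a t h]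
      omega

theorem pvW_step2 : ∀ (p : List Int) (lo e : Int),
    pvW lo (p ++ [e]) (e + 1) =
      max (pvW lo p e) (e - (if p.length ≤ 1 then lo else p.getD (p.length - 2) 0)) := by
  intro p
  induction p with
  | nil => intro lo e
           rw [pvW_le2 _ _ _ (by simp), pvW_le2 _ _ _ (by simp)]; simp; omega
  | cons a t IH =>
    intro lo e
    match t with
    | [] =>
      rw [pvW_le2 _ _ _ (by simp), pvW_le2 _ _ _ (by simp)]; simp; omega
    | [c] =>
      rw [pvW_gt2 _ _ _ (by simp), pvW_le2 _ _ _ (by simp),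
          pvW_le2 _ _ _ (by simp)]
      simp; omega
    | b :: c :: t' =>
      rw [pvW_gt2 lo ((a :: b :: c :: t') ++ [e]) (e + 1) (by simp),
          pvW_gt2 lo (a :: b :: c :: t') e (by simp)]
      simp only [List.cons_append, List.tail_cons, List.getD_cons_zero,
        List.getD_cons_succ]
      rw [show (b :: c :: (t' ++ [e])) = ((b :: c :: t') ++ [e]) by simp]
      rw [IH a e]
      have h1 : ¬ ((b :: c :: t').length ≤ 1) := by simp
      have h2 : ¬ ((a :: b :: c :: t').length ≤ 1) := by simp
      rw [if_neg h1, if_neg h2]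
      have h4 : (a :: b :: c :: t').getD ((a :: b :: c :: t').length - 2) 0
          = (b :: c :: t').getD ((b :: c :: t').length - 2) 0 := by
        simp only [List.length_cons]
        have : t'.length + 1 + 1 + 1 - 2 = (t'.length + 1 + 1 - 2) + 1 := by omega
        rw [this, List.getD_cons_succ]
      rw [h4]
      omega

theorem pvZipFold (e : Int) : ∀ (p : List Int), 3 ≤ p.length → ∀ (lo init : Int),
    (((lo :: p ++ [e]).drop 3).zip (lo :: p ++ [e])).foldl
        (fun a q => max a (q.1 - q.2 - 1)) init = max init (pvW lo p e) := by
  intro p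
  induction p with
  | nil => intro h; simp at h
  | cons a t IH =>
    intro h lo init
    match t, IH, h with
    | [], _, h => simp at h
    | [b], _, h => simp at h
    | [b, c], _, _ =>
      rw [pvW_gt2 lo [a, b, c] e (by simp)]
      simp only [List.getD_cons_succ, List.getD_cons_zero, List.tail_cons]
      rw [pvW_le2 a [b, c] e (by simp)]
      simp only [List.cons_append, List.nil_append, List.drop_succ_cons,
        List.drop_zero, List.zip_cons_cons, List.foldl_cons]
      simp
    | b :: c :: d :: t'', IH, _ =>
      have step : (((lo :: (a :: b :: c :: d :: t'') ++ [e]).drop 3).zip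
            ((lo :: (a :: b :: c :: d :: t'') ++ [e]))).foldl
            (fun a q => max a (q.1 - q.2 - 1)) init
          = (((a :: (b :: c :: d :: t'') ++ [e]).drop 3).zip
            ((a :: (b :: c :: d :: t'') ++ [e]))).foldl
            (fun a q => max a (q.1 - q.2 - 1)) (max init (c - lo - 1)) := by
        simp only [List.cons_append, List.drop_succ_cons, List.drop_zero,
          List.zip_cons_cons, List.foldl_cons]
      rw [step, IH (by simp) a (max init (c - lo - 1))]
      rw [pvW_gt2 lo (a :: b :: c :: d :: t'') e (by simp)]
      simp only [List.getD_cons_succ, List.getD_cons_zero, List.tail_cons]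
      omega

theorem pvShrink_find (T : List Int) (u : List Bool) (f : Nat)
    (hfn : f < T.length) (hbf : pvB T u f = true) :
    ∀ l : Nat, l ≤ f →
    (∀ j, l ≤ j → j < f → pvB T u j = false) →
    pvShrink T u (l : Int) 3 = ((f : Int) + 1, 2) := by
  intro l
  induction hd : f - l generalizing l with
  | zero =>
    intro hlf hnone
    have hlf' : l = f := by omega
    subst hlf'
    rw [pvShrink]
    rw [dif_pos ⟨by omega, by exact_mod_cast Int.ofNat_lt.mpr hfn⟩]
    have : PySem.List.pyGetD T (l : Int) 0 = T.getD l 0 := PySem.List.pyGetD_natCast T l 0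
    rw [this]
    have hb : PySem.List.pyGetD u (T.getD l 0) false = true := hbf
    rw [if_pos hb]
    rw [pvShrink_noop T u _ _ (by omega)]
    rfl
  | succ n IH =>
    intro hlf hnone
    have hlf' : l < f := by omega
    rw [pvShrink]
    rw [dif_pos ⟨by omega, by exact_mod_cast Int.ofNat_lt.mpr (by omega)⟩]
    have : PySem.List.pyGetD T (l : Int) 0 = T.getD l 0 := PySem.List.pyGetD_natCast T l 0
    rw [this]
    have hb : PySem.List.pyGetD u (T.getD l 0) false = false :=
      hnone l (le_refl l) hlf'
    rw [if_neg (by rw [hb]; exact Bool.false_ne_true)]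
    have hcast : (l : Int) + 1 = ((l + 1 : Nat) : Int) := by push_cast; ring
    rw [hcast]
    exact IH (l + 1) (by omega) (by omega) (fun j hj1 hj2 => hnone j (by omega) hj2)

theorem pvBadPos_succ (T : List Int) (u : List Bool) (m : Nat) :
    pvBadPos T u (m + 1) =
      pvBadPos T u m ++ (if pvB T u m then [m] else []) := by
  simp [pvBadPos, List.range_succ, List.filter_append]
  by_cases hb : pvB T u m <;> simp [hb, List.filter]

theorem pvBadPos_mem (T : List Int) (u : List Bool) (m j : Nat) :
    j ∈ pvBadPos T u m ↔ j < m ∧ pvB T u j = true := by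
  simp [pvBadPos, List.mem_filter, List.mem_range]

theorem pvBadPos_sorted (T : List Int) (u : List Bool) (m : Nat) :
    (pvBadPos T u m).Pairwise (· < ·) :=
  List.Pairwise.filter _ List.pairwise_lt_range

theorem pvPos_eq (T : List Int) (u : List Bool) :
    ((PySem.List.enumerate T 0).filter (fun p => PySem.List.pyGetD u p.2 false)).map
        (fun p => p.1) =
      (pvBadPos T u T.length).map (fun j : Nat => (j : Int)) := by
  rw [PySem.List.enumerate_eq_map_pyRange T 0]
  have hlen : PySem.List.len T = (T.length : Int) := rfl
  rw [hlen, PySem.List.pyRange_zero_nat, List.map_map, List.filter_map, List.map_map]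
  have hpred : ((fun p => PySem.List.pyGetD u p.2 false) ∘
      (fun j => (j, PySem.List.pyGetD T j 0)) ∘ (fun k : Nat => (k : Int))) = pvB T u := by
    funext j; simp [pvB, Function.comp, PySem.List.pyGetD_natCast]
  have hfst : ((fun p : Int × Int => p.1) ∘
      (fun j => (j, PySem.List.pyGetD T j 0)) ∘ (fun k : Nat => (k : Int))) =
      (fun j : Nat => (j : Int)) := by
    funext j; simp [Function.comp]
  rw [hpred, hfst]
  simp [pvBadPos]

theorem pvGetDMap (p : List Nat) (i : Nat) (h : i < p.length) :
    (p.map (fun j : Nat => (j : Int))).getD i 0 = (p[i] : Int) := by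
  rw [List.getD_eq_getElem?_getD, List.getElem?_map, List.getElem?_eq_getElem h]
  rfl

theorem pvLast3_map (p : List Nat) :
    pvLast3 (-1) (p.map (fun j : Nat => (j : Int))) = pvLft p - 1 := by
  simp only [pvLast3, pvLft, List.length_map]
  by_cases h3 : 3 ≤ p.length
  · rw [if_neg (by omega), if_pos h3, pvGetDMap p _ (by omega),
      List.getD_eq_getElem _ _ (by omega)]
    omega
  · rw [if_pos (by omega), if_neg h3]; omega

theorem pvInvariant (T : List Int) (u : List Bool) :
    ∀ m, m ≤ T.length →
      ((PySem.List.enumerate T 0).take m).foldl (pvStepA T u) (0, 0, 0) =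
        (pvLft (pvBadPos T u m), min ((pvBadPos T u m).length : Int) 2,
          pvW (-1) ((pvBadPos T u m).map (fun j : Nat => (j : Int))) (m : Int)) := by
  intro m
  induction m with
  | zero =>
    intro _
    have : pvW (-1) ([] : List Int) 0 = 0 := by rw [pvW_le2 _ _ _ (by simp)]; ring
    simp [pvBadPos, pvLft, this]
  | succ m IH =>
    intro hm1
    have hm : m < T.length := by omega
    -- peel the (m+1)-st step off the fold
    have htake : (PySem.List.enumerate T 0).take (m + 1) =
        (PySem.List.enumerate T 0).take m ++ [((m : Int), T[m])] := by
      rw [List.take_add_one]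
      congr 1
      rw [PySem.List.getElem?_enumerate]
      simp [List.getElem?_eq_getElem hm]
    rw [htake, List.foldl_append, List.foldl_cons, List.foldl_nil, IH (by omega)]
    -- names for the prefix data
    have hgetd : T.getD m 0 = T[m] := List.getD_eq_getElem T 0 hm
    have hbad : PySem.List.pyGetD u T[m] false = pvB T u m := by
      rw [pvB, hgetd]
    have hsort := List.pairwise_iff_getElem.mp (pvBadPos_sorted T u m)
    have hLlen : ((pvBadPos T u m).map (fun j : Nat => (j : Int))).length
        = (pvBadPos T u m).length := by simp
    have hcastm : ((m + 1 : Nat) : Int) = (m : Int) + 1 := by push_cast; ring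
    by_cases hb : pvB T u m = true
    · -- the m-th element is unlucky
      have hsucc : pvBadPos T u (m + 1) = pvBadPos T u m ++ [m] := by
        rw [pvBadPos_succ, if_pos hb]
      by_cases hL : (pvBadPos T u m).length ≤ 1
      · -- at most one unlucky before: count stays ≤ 2, no shrink
        simp only [pvStepA, hbad, hb, if_pos]
        rw [pvShrink_noop T u _ _ (by omega)]
        have hlft0 : pvLft (pvBadPos T u m) = 0 := by
          rw [pvLft, if_neg (by omega)]
        rw [hsucc, hcastm]
        simp only [List.map_append, List.map_cons, List.map_nil]
        rw [pvW_step2, if_pos (by rw [hLlen]; omega)]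
        have hlftApp : pvLft (pvBadPos T u m ++ [m]) = 0 := by
          rw [pvLft, if_neg (by simp; omega)]
        rw [Prod.mk.injEq, Prod.mk.injEq]
        refine ⟨by rw [hlftApp, hlft0], by simp; omega, by omega⟩
      · -- at least two unlucky before: count reaches 3, shrink to past the
        -- third-from-last unlucky position
        have hL2 : 2 ≤ (pvBadPos T u m).length := by omega
        have hfin : (pvBadPos T u m).length - 2 < (pvBadPos T u m).length := by omega
        set p := pvBadPos T u m with hp
        set L := p.length with hLdef
        have hf : p[L - 2] ∈ p := List.getElem_mem _
        have hfm : p[L - 2] < m ∧ pvB T u (p[L - 2]) = true :=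
          (pvBadPos_mem T u m _).mp hf
        -- the Nat value of A's left pointer before this step
        set lN : Nat := if 3 ≤ L then p.getD (L - 3) 0 + 1 else 0 with hlN
        have hlft : pvLft p = (lN : Int) := by
          rw [pvLft, hlN]
          by_cases h3 : 3 ≤ L
          · rw [if_pos h3, if_pos h3]; push_cast; ring
          · rw [if_neg h3, if_neg h3]; rfl
        have hlf : lN ≤ p[L - 2] := by
          rw [hlN]
          by_cases h3 : 3 ≤ L
          · rw [if_pos h3]
            have := hsort (L - 3) (L - 2) (by omega) (by omega) (by omega)
            rw [List.getD_eq_getElem _ _ (by omega)]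
            omega
          · rw [if_neg h3]; omega
        have hgap : ∀ j, lN ≤ j → j < p[L - 2] → pvB T u j = false := by
          intro j hj1 hj2
          by_contra hcon
          have hbj : pvB T u j = true := by
            cases h : pvB T u j
            · exact absurd h hcon
            · rfl
          have hjm : j < m := by
            have := hfm.1; omega
          have hjmem : j ∈ p := (pvBadPos_mem T u m j).mpr ⟨hjm, hbj⟩
          obtain ⟨idx, hidx, hidxe⟩ := List.mem_iff_getElem.mp hjmem
          have hidx2 : idx < L - 2 := by
            by_contra hge
            have hge' : L - 2 ≤ idx := by omega
            rcases Nat.eq_or_lt_of_le hge' with heq | hlt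
            · subst heq; omega
            · have := hsort (L - 2) idx (by omega) (by omega) hlt
              omega
          by_cases h3 : 3 ≤ L
          · have hle : j ≤ p[L - 3] := by
              rcases Nat.eq_or_lt_of_le (by omega : idx ≤ L - 3) with heq | hlt
              · simp only [heq] at hidxe; omega
              · have := hsort idx (L - 3) (by omega) (by omega) hlt
                omega
            rw [hlN, if_pos h3, List.getD_eq_getElem _ _ (by omega)] at hj1
            omega
          · omega
        have hshr : pvShrink T u ((lN : Nat) : Int) 3 = ((p[L - 2] : Int) + 1, 2) := by
          have : (p[L - 2] : Nat) < T.length := by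
            have := hfm.1; omega
          exact pvShrink_find T u _ this hfm.2 lN hlf hgap
        -- compute the step
        simp only [pvStepA, hbad, hb, if_pos]
        have hc3 : min (L : Int) 2 + 1 = 3 := by omega
        rw [hlft, hc3, hshr]
        -- right-hand sides at m+1
        have hsucc' : pvBadPos T u (m + 1) = p ++ [m] := hsucc
        have hL' : (pvBadPos T u (m + 1)).length = L + 1 := by
          rw [hsucc']; simp [← hLdef]
        have hgetf : (p ++ [m]).getD (L + 1 - 3) 0 = p[L - 2] := by
          have : L + 1 - 3 = L - 2 := by omega
          rw [this, List.getD_eq_getElem _ _ (by simp only [List.length_append, List.length_cons, List.length_nil, ← hLdef]; omega),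
            List.getElem_append_left hfin]
        have hlft' : pvLft (pvBadPos T u (m + 1)) = (p[L - 2] : Int) + 1 := by
          rw [pvLft, hL', if_pos (by omega), hsucc', hgetf]
        rw [hlft', hL', hsucc', hcastm]
        simp only [List.map_append, List.map_cons, List.map_nil]
        rw [pvW_step2, if_neg (by rw [hLlen]; omega)]
        have hgetf2 : (p.map (fun j : Nat => (j : Int))).getD
            ((p.map (fun j : Nat => (j : Int))).length - 2) 0 = (p[L - 2] : Int) := by
          rw [hLlen, pvGetDMap p _ (by omega)]
        rw [hgetf2, Prod.mk.injEq, Prod.mk.injEq]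
        refine ⟨rfl, by simp; omega, by omega⟩
    · -- the m-th element is not unlucky: nothing changes but the window
      have hb' : pvB T u m = false := by
        cases h : pvB T u m
        · rfl
        · exact absurd h hb
      have hsucc : pvBadPos T u (m + 1) = pvBadPos T u m := by
        rw [pvBadPos_succ, if_neg (by rw [hb']; simp)]; simp
      simp only [pvStepA, hbad, hb', if_neg, Bool.false_eq_true, not_false_iff]
      rw [pvShrink_noop T u _ _ (by omega), hsucc, hcastm, pvW_step1, pvLast3_map,
        Prod.mk.injEq, Prod.mk.injEq]
      refine ⟨rfl, rfl, by omega⟩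

theorem pvW_ge_first (lo : Int) (p : List Int) (e : Int) (h : ¬ p.length ≤ 2) :
    p.getD 2 0 - lo - 1 ≤ pvW lo p e := by
  rw [pvW_gt2 _ _ _ h]; exact le_max_left _ _

-- ===== VERDICT (by name: the statement is the Claim_ definition above) =====
theorem kunlucky_spec : Claim_equal_kunlucky := by
  unfold Claim_equal_kunlucky
  intro T k _ _
  unfold Spec_kunlucky kunlucky kunlucky_alt
  by_cases hT : T.length = 0
  · simp [hT]
  · simp only [hT, if_false]
    have hlen : (PySem.List.enumerate T 0).length = T.length := by
      simp [PySem.List.length_enumerate]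
    have htl : List.take T.length (PySem.List.enumerate T 0) =
        PySem.List.enumerate T 0 := by rw [← hlen, List.take_length]
    have hfold := pvInvariant T (pvSieve T k) T.length (le_refl _)
    rw [htl] at hfold
    rw [hfold, pvPos_eq]
    dsimp only
    have hmlen : ((pvBadPos T (pvSieve T k) T.length).map
        (fun j : Nat => (j : Int))).length
        = (pvBadPos T (pvSieve T k) T.length).length := by simp
    by_cases hL : (pvBadPos T (pvSieve T k) T.length).length ≤ 2
    · rw [if_pos (by rw [hmlen]; exact_mod_cast hL)]
      rw [pvW_le2 _ _ _ (by rw [hmlen]; exact hL)]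
      omega
    · rw [if_neg (by rw [hmlen]; exact hL)]
      rw [pvZipFold ((T.length : Int))
        ((pvBadPos T (pvSieve T k) T.length).map (fun j : Nat => (j : Int)))
        (by rw [hmlen]; omega) (-1) 0]
      have hge := pvW_ge_first (-1)
        ((pvBadPos T (pvSieve T k) T.length).map (fun j : Nat => (j : Int)))
        ((T.length : Int)) (by rw [hmlen]; exact hL)
      have hget2 : ((pvBadPos T (pvSieve T k) T.length).map
          (fun j : Nat => (j : Int))).getD 2 0
          = ((pvBadPos T (pvSieve T k) T.length)[2]'(by omega) : Int) :=
        pvGetDMap _ 2 (by omega)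
      rw [hget2] at hge
      have hc : (0 : Int) ≤ ((pvBadPos T (pvSieve T k) T.length)[2]'(by omega) : Int) :=
        Int.natCast_nonneg _
      rw [max_eq_right (by omega)]
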